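-- pv_equiv track=rewrite | github.com/tcalmant/ipopo | pelix/shell/core.py | _find_assignment
-- ===== SOURCE A (Python) =====
-- def _find_assignment(arg_token):
--     """
--     Find the first non-escaped assignment in the given argument token.
--     Returns -1 if no assignment was found.
--
--     :param arg_token: The argument token
--     :return: The index of the first assignment, or -1
--     """
--     idx = arg_token.find('=')
--     while idx != -1:
--         if idx != 0:
--             if arg_token[idx - 1] != '\\':
--                 # No escape character
--                 return idx
--
--         idx = arg_token.find('=', idx + 1)
--
--     # No assignment found
--     return -1
-- ===== SOURCE B (Python) =====
-- def _find_assignment(arg_token):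
--     """Find the first non-escaped assignment in the given argument token.
--
--     Single pairwise scan: walk adjacent (prev, ch) pairs; an assignment is a
--     '=' whose predecessor is not a backslash (so a '=' at index 0 never counts).
--     """
--     for i, (prev, ch) in enumerate(zip(arg_token, arg_token[1:]), start=1):
--         if ch == '=' and prev != '\\':
--             return i
--     return -1
-- ===== Notes on version B (the rewrite author's own statement) =====
-- stated objective: idiomatic
-- what changed: Replaced the repeated str.find-and-check loop with a single pairwise scan over enumerate(zip(s, s[1:])), which checks each '=' together with its predecessor in one pass and keeps no manual index bookkeeping.
import Mathlib
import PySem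

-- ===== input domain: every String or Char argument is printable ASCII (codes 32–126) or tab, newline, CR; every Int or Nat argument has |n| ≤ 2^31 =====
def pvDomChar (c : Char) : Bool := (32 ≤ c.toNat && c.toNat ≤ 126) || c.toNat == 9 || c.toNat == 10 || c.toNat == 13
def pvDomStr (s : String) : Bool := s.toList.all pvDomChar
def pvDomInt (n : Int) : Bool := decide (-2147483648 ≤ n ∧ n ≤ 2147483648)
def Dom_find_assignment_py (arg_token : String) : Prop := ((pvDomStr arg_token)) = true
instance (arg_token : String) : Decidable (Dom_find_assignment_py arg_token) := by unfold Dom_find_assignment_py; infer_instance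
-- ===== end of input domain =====

-- Program equivalence: _find_assignment (pelix/shell/core.py).
-- B replaces A's repeated str.find loop by a single pairwise scan over adjacent
-- (prev, ch) pairs; same O(n) cost, simpler bookkeeping. Proved equal on all inputs.


-- ===== PORT A =====
-- A's while-loop: hop from '=' occurrence to '=' occurrence with find(start);
-- fuel (length + 1) bounds the iterations, the index strictly increases each round.
def faLoop (s : String) : Nat → Int → Int
  | 0, _ => -1
  | fuel + 1, idx =>
    if idx = -1 then -1
    else if idx ≠ 0 ∧ PySem.Str.pyGet? s (idx - 1) ≠ some '\\' then idx
    else faLoop s fuel (PySem.Str.findFrom s "=" (idx + 1) none)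

def find_assignment_py (arg_token : String) : Int :=
  faLoop arg_token (arg_token.toList.length + 1) (PySem.Str.find arg_token "=")

-- ===== PORT B =====
-- B's for-loop over enumerate(zip(s, s[1:]), start=1): carry the previous char.
def fbLoop (prev : Char) (rest : List Char) (i : Int) : Int :=
  match rest with
  | [] => -1
  | c :: cs => if c = '=' ∧ prev ≠ '\\' then i else fbLoop c cs (i + 1)

def find_assignment_py_alt (arg_token : String) : Int :=
  match arg_token.toList with
  | [] => -1
  | c :: cs => fbLoop c cs 1

-- ===== PRECONDITION & SPEC =====
def Spec_find_assignment_py (arg_token : String) (out : Int) : Prop := out = find_assignment_py_alt arg_token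
instance (arg_token : String) (out : Int) : Decidable (Spec_find_assignment_py arg_token out) := by unfold Spec_find_assignment_py; infer_instance

-- ===== CLAIM (what is proved, stated in full; the proofs are below) =====
def Claim_equal_find_assignment_py : Prop := ∀ (arg_token : String), Dom_find_assignment_py arg_token → Spec_find_assignment_py arg_token (find_assignment_py arg_token)

-- ===== LEMMAS AND PROOFS =====

-- Common specification: first index j ≥ max k 1 with s[j] = '=' and s[j-1] ≠ '\'.
def fgf (s : List Char) (k : Nat) : Int :=
  if k < s.length then
    if k ≠ 0 ∧ s.getD k ' ' = '=' ∧ s.getD (k - 1) ' ' ≠ '\\' then (k : Int)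
    else fgf s (k + 1)
  else -1
termination_by s.length - k

theorem fgf_of_no_eq (s : List Char) (k : Nat)
    (h : ∀ j, k ≤ j → j < s.length → s.getD j ' ' ≠ '=') : fgf s k = -1 := by
  unfold fgf
  split_ifs with h1 h2
  · exact absurd h2.2.1 (h k le_rfl h1)
  · exact fgf_of_no_eq s (k + 1) (fun j hj hjl => h j (by omega) hjl)
  · rfl
termination_by s.length - k

theorem fgf_skip (s : List Char) (k m : Nat) (hkm : k ≤ m) (hm : m ≤ s.length)
    (h : ∀ j, k ≤ j → j < m → s.getD j ' ' ≠ '=') : fgf s k = fgf s m := by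
  rcases Nat.eq_or_lt_of_le hkm with rfl | hlt
  · rfl
  · have hk : k < s.length := by omega
    have : fgf s k = fgf s (k + 1) := by
      conv_lhs => rw [fgf]
      rw [if_pos hk, if_neg]
      rintro ⟨-, h2, -⟩
      exact h k le_rfl hlt h2
    rw [this]
    exact fgf_skip s (k + 1) m (by omega) hm (fun j hj hjl => h j (by omega) hjl)
termination_by m - k

theorem singleton_prefix_head (x : Char) (l : List Char) : [x] <+: l ↔ l.head? = some x := by
  cases l with
  | nil => simp
  | cons a t =>
    simp only [List.head?_cons]
    constructor
    · rintro ⟨r, hr⟩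
      simp only [List.singleton_append] at hr
      injection hr with h1 _
      rw [h1]
    · intro h
      injection h with h
      exact ⟨t, by rw [h]; rfl⟩

theorem singleton_prefix_drop (s : List Char) (j : Nat) :
    ['='] <+: s.drop j ↔ (j < s.length ∧ s.getD j ' ' = '=') := by
  rw [singleton_prefix_head, List.head?_eq_getElem?, List.getElem?_drop, Nat.add_zero]
  constructor
  · intro h
    have hj : j < s.length := by
      by_contra hc
      rw [List.getElem?_eq_none (by omega)] at h
      simp at h
    refine ⟨hj, ?_⟩
    rw [List.getElem?_eq_getElem hj] at h
    rw [List.getD_eq_getElem _ _ hj]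
    exact Option.some_injective _ h
  · rintro ⟨hj, hv⟩
    rw [List.getElem?_eq_getElem hj]
    rw [List.getD_eq_getElem _ _ hj] at hv
    exact congrArg some hv

-- A's loop computes fgf when started at find-from-k.
theorem faLoop_eq_fgf (s : String) (fuel k : Nat) (hk : k ≤ s.toList.length)
    (hf : s.toList.length + 1 - k ≤ fuel) :
    faLoop s fuel (PySem.Chars.findFrom s.toList ['='] (k : Int) none) = fgf s.toList k := by
  obtain ⟨f, rfl⟩ : ∃ f, fuel = f + 1 := ⟨fuel - 1, by omega⟩
  set m := PySem.Chars.findFrom s.toList ['='] (k : Int) none with hmdef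
  by_cases hm1 : m = -1
  · rw [faLoop, if_pos hm1]
    have hno : ¬ ['='] <:+: s.toList.drop k :=
      (PySem.Chars.findFrom_natCast_eq_neg_one_iff s.toList ['='] k hk).1 (hmdef ▸ hm1)
    refine (fgf_of_no_eq s.toList k ?_).symm
    intro j hj hjl hv
    apply hno
    have hsp : ['='] <+: (s.toList.drop k).drop (j - k) := by
      rw [List.drop_drop]
      have hjk : k + (j - k) = j := by omega
      rw [hjk]
      exact (singleton_prefix_drop s.toList j).2 ⟨hjl, hv⟩
    exact List.infix_iff_prefix_suffix.mpr ⟨_, hsp, List.drop_suffix _ _⟩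
  · obtain ⟨hkm, hpre, hmin⟩ :=
      PySem.Chars.findFrom_natCast_spec s.toList ['='] k hk hm1
    have hm0 : 0 ≤ m := le_trans (by exact_mod_cast Nat.zero_le k) hkm
    obtain ⟨hmlt, hval⟩ := (singleton_prefix_drop s.toList m.toNat).1 hpre
    have hmcast : (m.toNat : Int) = m := Int.toNat_of_nonneg hm0
    have hkmn : k ≤ m.toNat := by omega
    have hskip : fgf s.toList k = fgf s.toList m.toNat := by
      refine fgf_skip s.toList k m.toNat hkmn (by omega) ?_
      intro j hj hjl hv
      exact hmin j (by exact_mod_cast hj) (by omega)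
        ((singleton_prefix_drop s.toList j).2 ⟨by omega, hv⟩)
    rw [faLoop, if_neg hm1, hskip]
    by_cases hc : m ≠ 0 ∧ PySem.Str.pyGet? s (m - 1) ≠ some '\\'
    · rw [if_pos hc]
      have hmn0 : m.toNat ≠ 0 := by omega
      have hprev : s.toList.getD (m.toNat - 1) ' ' ≠ '\\' := by
        intro hv2
        apply hc.2
        have : m - 1 = ((m.toNat - 1 : Nat) : Int) := by omega
        rw [this]
        simp only [PySem.Str.pyGet?_natCast]
        rw [List.getElem?_eq_getElem (by omega)]
        rw [List.getD_eq_getElem _ _ (by omega)] at hv2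
        exact congrArg some hv2
      rw [fgf, if_pos hmlt, if_pos ⟨hmn0, hval, hprev⟩, hmcast]
    · rw [if_neg hc]
      have hstep : fgf s.toList m.toNat = fgf s.toList (m.toNat + 1) := by
        conv_lhs => rw [fgf]
        rw [if_pos hmlt]
        rw [if_neg]
        rintro ⟨hh1, hh2, hh3⟩
        apply hc
        refine ⟨by omega, fun hv2 => hh3 ?_⟩
        have he : m - 1 = ((m.toNat - 1 : Nat) : Int) := by omega
        rw [he, PySem.Str.pyGet?_natCast, List.getElem?_eq_getElem (by omega)] at hv2
        rw [List.getD_eq_getElem _ _ (by omega)]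
        exact Option.some_injective _ hv2
      rw [hstep]
      have : m + 1 = ((m.toNat + 1 : Nat) : Int) := by omega
      have hrec := faLoop_eq_fgf s f (m.toNat + 1) (by omega) (by omega)
      rw [← this] at hrec
      simpa using hrec
termination_by fuel

theorem fbLoop_eq_fgf (rest : List Char) : ∀ (pre : List Char) (prev : Char),
    fbLoop prev rest ((pre.length : Int) + 1) = fgf (pre ++ prev :: rest) (pre.length + 1) := by
  induction rest with
  | nil =>
    intro pre prev
    rw [fbLoop, fgf]
    simp
  | cons c cs ih =>
    intro pre prev
    have hlen : (pre ++ prev :: c :: cs).length = pre.length + cs.length + 2 := by simp; omega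
    have hgk : (pre ++ prev :: c :: cs).getD (pre.length + 1) ' ' = c := by
      rw [List.getD_eq_getElem _ _ (by omega)]
      rw [List.getElem_append_right (by omega)]
      simp
    have hgp : (pre ++ prev :: c :: cs).getD (pre.length + 1 - 1) ' ' = prev := by
      rw [List.getD_eq_getElem _ _ (by omega)]
      simp
    conv_rhs => rw [fgf]
    rw [if_pos (by omega), hgk, hgp, fbLoop]
    by_cases hc : c = '=' ∧ prev ≠ '\\'
    · rw [if_pos hc]
      rw [if_pos (show pre.length + 1 ≠ 0 ∧ c = '=' ∧ prev ≠ '\\' from ⟨by omega, hc.1, hc.2⟩)]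
      push_cast
      ring
    · rw [if_neg hc, if_neg (by rintro ⟨-, h2, h3⟩; exact hc ⟨h2, h3⟩)]
      have key := ih (pre ++ [prev]) c
      have e1 : (pre ++ [prev]) ++ c :: cs = pre ++ prev :: c :: cs := by simp
      have e2 : (pre ++ [prev]).length = pre.length + 1 := by simp
      rw [e1, e2] at key
      have e3 : ((pre.length + 1 : Nat) : Int) + 1 = (pre.length : Int) + 1 + 1 := by push_cast; ring
      rw [e3] at key
      exact key

theorem alt_eq_fgf (s : String) : find_assignment_py_alt s = fgf s.toList 0 := by
  unfold find_assignment_py_alt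
  rcases hs : s.toList with _ | ⟨c, cs⟩
  · rw [fgf]; simp
  · show fbLoop c cs 1 = fgf (c :: cs) 0
    have h0 : fgf (c :: cs) 0 = fgf (c :: cs) 1 := by
      conv_lhs => rw [fgf]
      rw [if_pos (by simp), if_neg (by simp)]
    rw [h0]
    have := fbLoop_eq_fgf cs [] c
    simpa using this

-- ===== VERDICT (by name: the statement is the Claim_ definition above) =====
theorem find_assignment_py_spec : Claim_equal_find_assignment_py := by
  intro s _
  unfold Spec_find_assignment_py find_assignment_py
  rw [alt_eq_fgf]
  have h := faLoop_eq_fgf s (s.toList.length + 1) 0 (by omega) (by omega)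
  rw [← h]
  congr 1
  simp [PySem.Chars.findFrom_zero]
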